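-- pv_equiv track=rewrite | github.com/pypi-data/pypi-mirror-45 | packages/post-tonal-theory-helper-mbmasuda/post_tonal_theory_helper_mbmasuda-0.1.1-py3-none-any.whl/ptth/api.py | get_most_packed_to_the_left
-- ===== SOURCE A (Python) =====
-- def get_most_packed_to_the_left(chord1, chord2):
--     """
--     Returns the chord that is the most packed to the left.
--
--     Most packed to the left means the ordering
--     that has the smallest interval from first
--     (lowest) to last (highest).  If there is a
--     tie, compare the intervals between the first
--     and second-to-last notes.  If there is still
--     a tie, compare the intervals between the
--     first and third-to-last notes, and so on.
--     If there is still a tie after all notes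
--     have been compared, choose the ordering
--     beginning with the pitch class represented
--     by the smallest integer.
--
--     Params:
--         * chord1 (tuple): a pitch class set
--         * chord2 (tuple): a pitch class set
--
--     Returns:
--         * winner (tuple): a pitch class set
--     """
--     if len(chord1) != len(chord2):
--         raise ValueError('the chords must have the same number of notes')
--
--     def _get_most_packed_to_the_left_size_one(chord1, chord2):
--         one = chord1[0]
--         two = chord2[0]
--
--         if not two < one:
--             return chord1
--         else:
--             return chord2
--
--     if len(chord1) == 1:
--         return _get_most_packed_to_the_left_size_one(chord1, chord2)
--
--     for i in range(len(chord1) - 1, 0, -1):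
--         diff1 = mod_12(chord1[i] - chord1[0])
--         diff2 = mod_12(chord2[i] - chord2[0])
--
--         if diff1 < diff2:
--             return chord1
--         elif diff2 < diff1:
--             return chord2
--         else:
--             if i == 1:
--                 if chord1[0] < chord2[0]:
--                     return chord1
--                 elif chord2[0] < chord1[0]:
--                     return chord2
--                 else:
--                     return _get_most_packed_to_the_left_size_one(chord1, chord2)
--
-- def mod_12(any_int):
--     """
--     Returns the value of the input modulo 12
--
--     Params:
--         * any_int (int): any integer
--
--     Returns:
--         * the integer modulo 12
--     """
--     return any_int % 12
-- ===== SOURCE B (Python) =====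
-- def get_most_packed_to_the_left(chord1, chord2):
--     if len(chord1) != len(chord2):
--         raise ValueError('the chords must have the same number of notes')
--
--     # Single FORWARD pass: the backward first-difference rule is equivalent to
--     # keeping the winner of the LAST differing interval seen while scanning
--     # indices 1..n-1 upward, starting from the pitch-class tiebreak.
--     winner = chord1 if chord1[0] <= chord2[0] else chord2
--     for i in range(1, len(chord1)):
--         diff1 = (chord1[i] - chord1[0]) % 12
--         diff2 = (chord2[i] - chord2[0]) % 12
--         if diff1 < diff2:
--             winner = chord1
--         elif diff2 < diff1:
--             winner = chord2
--     return winner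
-- ===== Notes on version B (the rewrite author's own statement) =====
-- stated objective: simpler
-- what changed: Replaces the backward early-exit comparison loop (with its i==1 special case and size-one helper) by a single forward fold that starts from the pitch-class tiebreak and overwrites the winner at every differing interval, so the last difference seen decides.
-- outside the precondition, e.g. on get_most_packed_to_the_left((), ()): A returns None, B raises IndexError
import Mathlib
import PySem

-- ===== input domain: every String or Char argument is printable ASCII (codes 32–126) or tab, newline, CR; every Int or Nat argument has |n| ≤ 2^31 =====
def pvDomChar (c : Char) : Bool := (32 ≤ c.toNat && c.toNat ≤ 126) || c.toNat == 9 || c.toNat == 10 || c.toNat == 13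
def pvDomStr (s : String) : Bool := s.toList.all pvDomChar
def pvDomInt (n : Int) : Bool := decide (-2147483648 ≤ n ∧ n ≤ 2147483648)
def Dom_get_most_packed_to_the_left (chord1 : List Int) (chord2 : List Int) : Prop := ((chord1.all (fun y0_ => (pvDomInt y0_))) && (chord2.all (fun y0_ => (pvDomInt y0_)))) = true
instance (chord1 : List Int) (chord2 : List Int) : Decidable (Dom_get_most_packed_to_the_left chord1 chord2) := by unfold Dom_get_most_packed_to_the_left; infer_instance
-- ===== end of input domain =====

-- B replaces A's backward early-exit loop (with its i == 1 special case and size-one helper)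
-- by a single forward fold that overwrites the winner at each differing interval (objective: simpler).

-- ===== PORT A =====
def mod_12 (any_int : Int) : Int := PySem.Int.mod any_int 12

def pvSizeOne (chord1 chord2 : List Int) : List Int :=
  let one := PySem.List.pyGetD chord1 0 0
  let two := PySem.List.pyGetD chord2 0 0
  if ¬ (two < one) then chord1 else chord2

def pvLoopA (chord1 chord2 : List Int) : List Int → List Int
  | [] => []   -- Python falls off the loop (returning None) only for empty chords; outside Pre_
  | i :: rest =>
    let diff1 := mod_12 (PySem.List.pyGetD chord1 i 0 - PySem.List.pyGetD chord1 0 0)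
    let diff2 := mod_12 (PySem.List.pyGetD chord2 i 0 - PySem.List.pyGetD chord2 0 0)
    if diff1 < diff2 then chord1
    else if diff2 < diff1 then chord2
    else if i == 1 then
      if PySem.List.pyGetD chord1 0 0 < PySem.List.pyGetD chord2 0 0 then chord1
      else if PySem.List.pyGetD chord2 0 0 < PySem.List.pyGetD chord1 0 0 then chord2
      else pvSizeOne chord1 chord2
    else pvLoopA chord1 chord2 rest

def get_most_packed_to_the_left (chord1 : List Int) (chord2 : List Int) : List Int :=
  if chord1.length ≠ chord2.length then []   -- Python raises ValueError here; outside Pre_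
  else if chord1.length = 1 then pvSizeOne chord1 chord2
  else pvLoopA chord1 chord2 (PySem.List.pyRange ((chord1.length : Int) - 1) 0 (-1))

-- ===== PORT B =====
-- one forward-fold step: overwrite the winner whenever the intervals at index i differ
def pvStepB (chord1 chord2 : List Int) (w : List Int) (i : Int) : List Int :=
  let diff1 := PySem.Int.mod (PySem.List.pyGetD chord1 i 0 - PySem.List.pyGetD chord1 0 0) 12
  let diff2 := PySem.Int.mod (PySem.List.pyGetD chord2 i 0 - PySem.List.pyGetD chord2 0 0) 12
  if diff1 < diff2 then chord1
  else if diff2 < diff1 then chord2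
  else w

def get_most_packed_to_the_left_alt (chord1 : List Int) (chord2 : List Int) : List Int :=
  if chord1.length ≠ chord2.length then []   -- Python raises ValueError here; outside Pre_
  else
    (PySem.List.pyRange 1 (chord1.length : Int) 1).foldl (pvStepB chord1 chord2)
      (if PySem.List.pyGetD chord1 0 0 ≤ PySem.List.pyGetD chord2 0 0 then chord1 else chord2)

-- ===== PRECONDITION & SPEC =====
-- Pre_ excludes length-mismatched chords (A raises ValueError) and empty chords
-- (A returns None, which is not a tuple value; B raises IndexError there).
def Pre_get_most_packed_to_the_left (chord1 : List Int) (chord2 : List Int) : Prop :=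
  chord1.length = chord2.length ∧ chord1 ≠ []
instance (chord1 : List Int) (chord2 : List Int) : Decidable (Pre_get_most_packed_to_the_left chord1 chord2) := by unfold Pre_get_most_packed_to_the_left; infer_instance

def pvWitness_get_most_packed_to_the_left : List Int × List Int := ([0, 4, 7], [1, 2, 3])

def Spec_get_most_packed_to_the_left (chord1 : List Int) (chord2 : List Int) (out : List Int) : Prop := out = get_most_packed_to_the_left_alt chord1 chord2
instance (chord1 : List Int) (chord2 : List Int) (out : List Int) : Decidable (Spec_get_most_packed_to_the_left chord1 chord2 out) := by unfold Spec_get_most_packed_to_the_left; infer_instance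

-- ===== CLAIM (what is proved, stated in full; the proofs are below) =====
def Claim_equal_get_most_packed_to_the_left : Prop := ∀ (chord1 : List Int) (chord2 : List Int), Dom_get_most_packed_to_the_left chord1 chord2 → Pre_get_most_packed_to_the_left chord1 chord2 → Spec_get_most_packed_to_the_left chord1 chord2 (get_most_packed_to_the_left chord1 chord2)

-- ===== LEMMAS AND PROOFS =====

-- the tiebreak value both versions reach when every interval agrees
def pvTb (c1 c2 : List Int) : List Int :=
  if PySem.List.pyGetD c1 0 0 ≤ PySem.List.pyGetD c2 0 0 then c1 else c2

-- A's loop run on m ++ [1] (1 ∉ m) is the right fold of B's step over m,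
-- seeded with the index-1 step applied to the tiebreak
theorem pvLoopA_eq_foldr (c1 c2 : List Int) (m : List Int) (hm : (1 : Int) ∉ m) :
    pvLoopA c1 c2 (m ++ [1]) =
      m.foldr (fun i acc => pvStepB c1 c2 acc i) (pvStepB c1 c2 (pvTb c1 c2) 1) := by
  induction m with
  | nil =>
    simp only [List.nil_append, pvLoopA, pvStepB, pvTb, pvSizeOne, mod_12, List.foldr_nil]
    split_ifs <;> simp_all <;> omega
  | cons j m ih =>
    have hj : j ≠ 1 := fun h => hm (by simp [h])
    have hm' : (1 : Int) ∉ m := fun h => hm (List.mem_cons_of_mem _ h)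
    have hjb : (j == 1) = false := by simp [hj]
    have hstep : pvLoopA c1 c2 ((j :: m) ++ [1]) =
        pvStepB c1 c2 (pvLoopA c1 c2 (m ++ [1])) j := by
      simp only [List.cons_append, pvLoopA, pvStepB, mod_12, hjb, Bool.false_eq_true,
        if_false]
    rw [hstep, ih hm', List.foldr_cons]

-- ===== VERDICT (by name: the statement is the Claim_ definition above) =====
theorem get_most_packed_to_the_left_spec : Claim_equal_get_most_packed_to_the_left := by
  intro c1 c2 _ hpre
  obtain ⟨hlen, hne⟩ := hpre
  unfold Spec_get_most_packed_to_the_left get_most_packed_to_the_left get_most_packed_to_the_left_alt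
  have hnd : ¬ (c1.length ≠ c2.length) := by omega
  simp only [if_neg hnd]
  have h0 : c1.length ≠ 0 := by simpa [List.length_eq_zero_iff] using hne
  by_cases h1 : c1.length = 1
  · -- size-one: A's helper vs B's fold over the empty range with the tiebreak seed
    rw [if_pos h1, h1]
    rw [PySem.List.pyRange_one_eq_nil (by norm_num)]
    simp only [List.foldl_nil, pvSizeOne]
    split_ifs <;> simp_all <;> omega
  · -- length ≥ 2: countdown range = (forward tail ++ [1]).reverse; fold-reverse bridge
    rw [if_neg h1]
    have hlen2 : 2 ≤ c1.length := by omega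
    have hrev : PySem.List.pyRange ((c1.length : Int) - 1) 0 (-1)
        = (PySem.List.pyRange 1 (c1.length : Int) 1).reverse := by
      rw [PySem.List.pyRange_neg_one_eq_reverse]
      norm_num
    have hcons : PySem.List.pyRange 1 (c1.length : Int) 1
        = 1 :: PySem.List.pyRange 2 (c1.length : Int) 1 := by
      rw [PySem.List.pyRange_one_cons (by exact_mod_cast by omega : (1:Int) < (c1.length : Int))]
      norm_num
    have hnm : (1 : Int) ∉ (PySem.List.pyRange 2 (c1.length : Int) 1).reverse := by
      intro h
      have := (PySem.List.mem_pyRange_one).mp (List.mem_reverse.mp h)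
      omega
    rw [hrev, hcons]
    simp only [List.reverse_cons, List.foldl_cons]
    rw [pvLoopA_eq_foldr c1 c2 _ hnm, List.foldr_reverse]
    rfl
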